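-- pv_equiv track=rewrite | github.com/pikk7/aoc2021 | 3/main.py | get_zeros_ones
-- ===== SOURCE A (Python) =====
-- def get_zeros_ones(lines):
--     i = 0
--     one = 0
--     zero = 0
--
--     j = 0
--     line_end = len(lines[i])
--     data = []
--     while(j < line_end):
--         i = 0
--         one = 0
--         zero = 0
--         while(i < len(lines)):
--             if(lines[i][j] == "0"):
--                 zero = zero+1
--             else:
--                 one = one+1
--             i = i+1
--         j = j+1
--         data.append({"zero": zero, "one": one})
--
--     return data
-- ===== SOURCE B (Python) =====
-- def _bump(d, ch):
--     if ch == "0":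
--         return {"zero": d["zero"] + 1, "one": d["one"]}
--     return {"zero": d["zero"], "one": d["one"] + 1}
--
--
-- def get_zeros_ones(lines):
--     width = len(lines[0])
--     data = [{"zero": 0, "one": 0} for _ in range(width)]
--     for line in lines:
--         data = [_bump(d, line[j]) for j, d in enumerate(data)]
--     return data
-- ===== Notes on version B (the rewrite author's own statement) =====
-- stated objective: alternative
-- what changed: A scans the grid column-by-column with two nested while loops, recomputing a single (zero,one) counter pair per column; B makes one row-major pass, maintaining the whole list of per-column counter dicts at once and rebuilding it for each line.
import Mathlib
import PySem

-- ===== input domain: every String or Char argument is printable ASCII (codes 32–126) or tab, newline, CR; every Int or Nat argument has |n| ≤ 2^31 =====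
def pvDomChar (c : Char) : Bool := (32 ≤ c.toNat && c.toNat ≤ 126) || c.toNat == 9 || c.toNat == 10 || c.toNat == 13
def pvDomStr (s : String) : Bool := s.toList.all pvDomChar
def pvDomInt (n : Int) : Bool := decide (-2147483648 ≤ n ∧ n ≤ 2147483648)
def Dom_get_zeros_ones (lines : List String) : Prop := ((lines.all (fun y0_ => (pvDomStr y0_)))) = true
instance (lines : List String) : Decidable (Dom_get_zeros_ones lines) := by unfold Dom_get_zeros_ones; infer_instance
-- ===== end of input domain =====

-- B replaces A's column-by-column double while loop by a single row-major pass that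
-- maintains all per-column counter dicts at once (objective: alternative decomposition, same cost).

-- ===== PORT A =====
-- A: outer while over columns j < len(lines[0]); inner while over rows, counting
-- zero/one for that column; append {"zero": zero, "one": one}.
-- lines[i][j] is ported as (PySem.Str.pyGet? …).getD ' '; the none (IndexError) case is excluded by Pre_.
def get_zeros_ones (lines : List String) : List (List (String × Int)) :=
  let line_end : Nat := (PySem.Str.len ((PySem.List.pyGet? lines 0).getD "")).toNat
  (List.range line_end).foldl (fun data (j : Nat) =>
    let zo : Int × Int := lines.foldl (fun (zo : Int × Int) line =>
      if (PySem.Str.pyGet? line (j : Int)).getD ' ' = '0' then (zo.1 + 1, zo.2)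
      else (zo.1, zo.2 + 1)) ((0 : Int), (0 : Int))
    data ++ [[("zero", zo.1), ("one", zo.2)]]) []

-- ===== PORT B =====
-- d[k] for B's dicts (key always present there); first match, default irrelevant
def pvLookup (d : List (String × Int)) (k : String) : Int :=
  ((d.find? (fun p => p.1 == k)).map (·.2)).getD 0

-- _bump(d, line[j]) from Source B
def pvBump (line : String) (j : Int) (d : List (String × Int)) : List (String × Int) :=
  if (PySem.Str.pyGet? line j).getD ' ' = '0'
  then [("zero", pvLookup d "zero" + 1), ("one", pvLookup d "one")]
  else [("zero", pvLookup d "zero"), ("one", pvLookup d "one" + 1)]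

def get_zeros_ones_alt (lines : List String) : List (List (String × Int)) :=
  let width : Nat := (PySem.Str.len ((PySem.List.pyGet? lines 0).getD "")).toNat
  let data : List (List (String × Int)) :=
    (List.range width).map (fun _ => [("zero", (0 : Int)), ("one", (0 : Int))])
  lines.foldl (fun data line =>
    (PySem.List.enumerate data).map (fun p => pvBump line p.1 p.2)) data

-- ===== PRECONDITION & SPEC =====
-- Pre_ excludes exactly the inputs where the Python A raises IndexError:
-- an empty list (lines[0]) and grids whose later rows are shorter than row 0
-- (lines[i][j]); B raises IndexError at the same inputs.
def Pre_get_zeros_ones (lines : List String) : Prop :=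
  lines ≠ [] ∧ ∀ l ∈ lines, PySem.Str.len (lines.headD "") ≤ PySem.Str.len l
instance (lines : List String) : Decidable (Pre_get_zeros_ones lines) := by
  unfold Pre_get_zeros_ones; infer_instance
def pvWitness_get_zeros_ones : List String := ["01", "10", "111"]

def Spec_get_zeros_ones (lines : List String) (out : List (List (String × Int))) : Prop := out = get_zeros_ones_alt lines
instance (lines : List String) (out : List (List (String × Int))) : Decidable (Spec_get_zeros_ones lines out) := by unfold Spec_get_zeros_ones; infer_instance

-- ===== CLAIM (what is proved, stated in full; the proofs are below) =====
def Claim_equal_get_zeros_ones : Prop := ∀ (lines : List String), Dom_get_zeros_ones lines → Pre_get_zeros_ones lines → Spec_get_zeros_ones lines (get_zeros_ones lines)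

-- ===== LEMMAS AND PROOFS =====

-- generic: A's append-accumulating fold is a map
theorem pv_foldl_append_singleton {α β : Type} (l : List α) (f : α → β) (acc : List β) :
    l.foldl (fun d x => d ++ [f x]) acc = acc ++ l.map f := by
  induction l generalizing acc with
  | nil => simp
  | cons x xs ih => simp [List.foldl_cons, ih]

-- one B step acts pointwise at each index
theorem pv_step_getElem? (line : String) (data : List (List (String × Int))) (k : Nat) :
    ((PySem.List.enumerate data).map (fun p => pvBump line p.1 p.2))[k]? =
      data[k]?.map (fun d => pvBump line (k : Int) d) := by
  rw [List.getElem?_map, PySem.List.getElem?_enumerate]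
  cases data[k]? <;> simp

-- B's outer fold acts pointwise at each index
theorem pv_foldB_getElem? (lines : List String) (data : List (List (String × Int))) (k : Nat) :
    (lines.foldl (fun d line => (PySem.List.enumerate d).map (fun p => pvBump line p.1 p.2)) data)[k]? =
      data[k]?.map (fun d => lines.foldl (fun d line => pvBump line (k : Int) d) d) := by
  induction lines generalizing data with
  | nil => simp
  | cons line rest ih =>
      simp only [List.foldl_cons, ih, pv_step_getElem?]
      cases data[k]? <;> simp

-- pvBump on a literal two-key dict
theorem pv_bump_pair (line : String) (j : Int) (a b : Int) :
    pvBump line j [("zero", a), ("one", b)] =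
      if (PySem.Str.pyGet? line j).getD ' ' = '0'
      then [("zero", a + 1), ("one", b)] else [("zero", a), ("one", b + 1)] := by
  simp [pvBump, pvLookup, List.find?]

-- per column: B's dict fold is A's (zero, one) pair fold, packaged
theorem pv_col_eq (lines : List String) (j : Int) (a b : Int) :
    lines.foldl (fun d line => pvBump line j d) [("zero", a), ("one", b)] =
      (fun zo : Int × Int => [("zero", zo.1), ("one", zo.2)])
        (lines.foldl (fun zo line =>
          if (PySem.Str.pyGet? line j).getD ' ' = '0' then (zo.1 + 1, zo.2)
          else (zo.1, zo.2 + 1)) (a, b)) := by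
  induction lines generalizing a b with
  | nil => rfl
  | cons line rest ih =>
      simp only [List.foldl_cons, pv_bump_pair]
      split <;> exact ih _ _

-- ===== VERDICT (by name: the statement is the Claim_ definition above) =====
theorem get_zeros_ones_spec : Claim_equal_get_zeros_ones := by
  intro lines _ _
  show get_zeros_ones lines = get_zeros_ones_alt lines
  unfold get_zeros_ones get_zeros_ones_alt
  apply List.ext_getElem?
  intro k
  rw [pv_foldl_append_singleton, pv_foldB_getElem?, List.nil_append,
    List.getElem?_map, List.getElem?_map]
  cases h : (List.range ((PySem.Str.len ((PySem.List.pyGet? lines 0).getD "")).toNat))[k]? with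
  | none => rfl
  | some j =>
      obtain ⟨hk, hval⟩ := List.getElem?_eq_some_iff.mp h
      simp only [List.getElem_range] at hval
      subst hval
      simp [pv_col_eq]
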